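-- pv_equiv track=rewrite | github.com/zdu881/autodri | gaze_onnx/experiments/build_gaze_audit_pack.py | sample_transition_indices
-- ===== SOURCE A (Python) =====
-- from typing import Dict, List, Optional, Sequence, Tuple
--
-- def sample_transition_indices(rows: Sequence[dict], n_samples: int, min_gap: int) -> List[int]:
--     if n_samples <= 0 or not rows:
--         return []
--     cand: List[int] = []
--     prev = str(rows[0].get("Gaze_Class", "")).strip()
--     for i in range(1, len(rows)):
--         cur = str(rows[i].get("Gaze_Class", "")).strip()
--         if cur and prev and cur != prev:
--             cand.append(i)
--         prev = cur or prev
--     out: List[int] = []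
--     for idx in cand:
--         if not out or idx - out[-1] >= max(1, min_gap):
--             out.append(idx)
--         if len(out) >= n_samples:
--             break
--     return out
-- ===== SOURCE B (Python) =====
-- def sample_transition_indices(rows, n_samples, min_gap):
--     if n_samples <= 0 or not rows:
--         return []
--     gap = max(1, min_gap)
--     out = []
--     last = None
--     prev = str(rows[0].get("Gaze_Class", "")).strip()
--     for i in range(1, len(rows)):
--         cur = str(rows[i].get("Gaze_Class", "")).strip()
--         if cur and prev and cur != prev:
--             if last is None or i - last >= gap:
--                 out.append(i)
--                 last = i
--                 if len(out) >= n_samples: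
--                     break
--         prev = cur or prev
--     return out
-- ===== Notes on version B (the rewrite author's own statement) =====
-- stated objective: simpler
-- what changed: B fuses A's two phases (build a full candidate list, then greedily filter it) into one single pass over the rows that selects transitions on the fly, tracking the last selected index and stopping as soon as n_samples are found, so no intermediate list is built.
import Mathlib
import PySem

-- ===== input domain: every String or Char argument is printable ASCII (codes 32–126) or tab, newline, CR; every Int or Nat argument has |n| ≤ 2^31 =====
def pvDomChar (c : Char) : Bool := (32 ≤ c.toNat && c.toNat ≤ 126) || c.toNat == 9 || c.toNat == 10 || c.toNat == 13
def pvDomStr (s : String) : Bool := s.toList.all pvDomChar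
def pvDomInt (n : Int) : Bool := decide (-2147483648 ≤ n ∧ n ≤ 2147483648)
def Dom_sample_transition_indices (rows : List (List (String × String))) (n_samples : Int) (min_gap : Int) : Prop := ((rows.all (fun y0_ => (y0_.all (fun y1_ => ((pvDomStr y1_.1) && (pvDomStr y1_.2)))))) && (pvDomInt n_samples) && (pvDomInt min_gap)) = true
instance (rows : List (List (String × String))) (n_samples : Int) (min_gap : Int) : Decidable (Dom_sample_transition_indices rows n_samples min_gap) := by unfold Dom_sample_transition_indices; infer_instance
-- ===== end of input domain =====

-- B fuses A's two passes (collect all transition candidates, then greedily pick with a min gap)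
-- into one single pass that selects on the fly and stops early; objective: simpler.

-- shared helper: str(row.get("Gaze_Class", "")).strip()
def pvGazeClass (r : List (String × String)) : String :=
  PySem.Str.strip ((PySem.Dict.mk r).getD "Gaze_Class" "")

-- ===== PORT A =====
-- first loop of A: cand-building over rows[1:], i is the running index
def pvCandLoop (i : Int) (prev : String) : List (List (String × String)) → List Int
  | [] => []
  | r :: rs =>
    let cur := pvGazeClass r
    (if cur ≠ "" ∧ prev ≠ "" ∧ cur ≠ prev then [i] else []) ++
      pvCandLoop (i + 1) (if cur ≠ "" then cur else prev) rs

-- second loop of A: greedy selection from cand with break once len(out) >= n_samples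
def pvSelLoop (n_samples min_gap : Int) (out : List Int) : List Int → List Int
  | [] => out
  | idx :: rest =>
    let ok : Bool := match out.getLast? with
      | none => true
      | some l => decide (idx - l ≥ max 1 min_gap)
    let out' := if ok then out ++ [idx] else out
    if (out'.length : Int) ≥ n_samples then out' else pvSelLoop n_samples min_gap out' rest

def sample_transition_indices (rows : List (List (String × String))) (n_samples : Int) (min_gap : Int) : List Int :=
  match rows with
  | [] => []
  | r0 :: rest =>
    if n_samples ≤ 0 then []
    else pvSelLoop n_samples min_gap [] (pvCandLoop 1 (pvGazeClass r0) rest)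

-- ===== PORT B =====
-- B's single fused pass: selects transition indices on the fly, tracking the last selected index
def pvFusedLoop (n_samples gap : Int) (i : Int) (prev : String) (last : Option Int)
    (out : List Int) : List (List (String × String)) → List Int
  | [] => out
  | r :: rs =>
    let cur := pvGazeClass r
    if cur ≠ "" ∧ prev ≠ "" ∧ cur ≠ prev then
      if (match last with | none => true | some l => decide (i - l ≥ gap) : Bool) then
        let out' := out ++ [i]
        if (out'.length : Int) ≥ n_samples then out'
        else pvFusedLoop n_samples gap (i + 1) (if cur ≠ "" then cur else prev) (some i) out' rs
      else pvFusedLoop n_samples gap (i + 1) (if cur ≠ "" then cur else prev) last out rs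
    else pvFusedLoop n_samples gap (i + 1) (if cur ≠ "" then cur else prev) last out rs

def sample_transition_indices_alt (rows : List (List (String × String))) (n_samples : Int) (min_gap : Int) : List Int :=
  match rows with
  | [] => []
  | r0 :: rest =>
    if n_samples ≤ 0 then []
    else pvFusedLoop n_samples (max 1 min_gap) 1 (pvGazeClass r0) none [] rest

-- ===== PRECONDITION & SPEC =====
def Spec_sample_transition_indices (rows : List (List (String × String))) (n_samples : Int) (min_gap : Int) (out : List Int) : Prop := out = sample_transition_indices_alt rows n_samples min_gap
instance (rows : List (List (String × String))) (n_samples : Int) (min_gap : Int) (out : List Int) : Decidable (Spec_sample_transition_indices rows n_samples min_gap out) := by unfold Spec_sample_transition_indices; infer_instance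

-- ===== CLAIM (what is proved, stated in full; the proofs are below) =====
def Claim_equal_sample_transition_indices : Prop := ∀ (rows : List (List (String × String))) (n_samples : Int) (min_gap : Int), Dom_sample_transition_indices rows n_samples min_gap → Spec_sample_transition_indices rows n_samples min_gap (sample_transition_indices rows n_samples min_gap)

-- ===== LEMMAS AND PROOFS =====

-- the fused pass computes exactly the greedy selection over the candidate list,
-- provided `last` is the last element of `out` and `out` is still short of `n_samples`
theorem pvFused_eq_sel (n_samples min_gap : Int)
    (rest : List (List (String × String))) :
    ∀ (i : Int) (prev : String) (out : List Int),
      (out.length : Int) < n_samples →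
      pvFusedLoop n_samples (max 1 min_gap) i prev out.getLast? out rest =
        pvSelLoop n_samples min_gap out (pvCandLoop i prev rest) := by
  induction rest with
  | nil => intro i prev out _; simp [pvFusedLoop, pvCandLoop, pvSelLoop]
  | cons r rs ih =>
    intro i prev out hlen
    simp only [pvFusedLoop, pvCandLoop]
    by_cases hhit : pvGazeClass r ≠ "" ∧ prev ≠ "" ∧ pvGazeClass r ≠ prev
    · simp only [if_pos hhit, List.singleton_append, pvSelLoop]
      by_cases hok : (match out.getLast? with
          | none => true
          | some l => decide (i - l ≥ max 1 min_gap)) = true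
      · simp only [hok, if_true]
        by_cases hfull : ((out ++ [i]).length : Int) ≥ n_samples
        · simp only [if_pos hfull]
        · simp only [if_neg hfull]
          have : (out ++ [i]).getLast? = some i := by simp
          rw [← this, ih (i + 1) _ (out ++ [i]) (by omega)]
      · simp only [eq_false_of_ne_true hok, Bool.false_eq_true, if_false]
        have hfull : ¬ ((out.length : Int) ≥ n_samples) := by omega
        simp only [if_neg hfull]
        exact ih (i + 1) _ out hlen
    · simp only [if_neg hhit, List.nil_append]
      exact ih (i + 1) _ out hlen

-- ===== VERDICT (by name: the statement is the Claim_ definition above) =====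
theorem sample_transition_indices_spec : Claim_equal_sample_transition_indices := by
  intro rows n_samples min_gap _
  unfold Spec_sample_transition_indices sample_transition_indices sample_transition_indices_alt
  cases rows with
  | nil => rfl
  | cons r0 rest =>
    by_cases hn : n_samples ≤ 0
    · simp [hn]
    · simp only [if_neg hn]
      have := pvFused_eq_sel n_samples min_gap rest 1 (pvGazeClass r0) [] (by simp; omega)
      simpa using this.symm
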